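-- pv_equiv track=rewrite | github.com/ancel/py_demo | util/file_util.py | increment_for_dict
-- ===== SOURCE A (Python) =====
-- def increment_for_dict(stat_dict, stat_dict2):
--     keys = stat_dict.keys()|stat_dict2.keys()
--     increment_dict = dict()
--     for x in keys:
--         count = 0
--         if x in stat_dict:
--             count = stat_dict[x]
--         count2 = 0
--         if x in stat_dict2:
--             count2 = stat_dict2[x]
--         increment = count2 - count
--         if increment!=0:
--             increment_dict[x] = increment
--     # increment_list= sorted(increment_dict.items(),key=lambda d:d[1], reverse=True)
--     return increment_dict
-- ===== SOURCE B (Python) =====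
-- def increment_for_dict(stat_dict, stat_dict2):
--     # two-pass subtract: seed with negated counts of stat_dict, add stat_dict2, drop zeros
--     inc = {}
--     for k, v in stat_dict.items():
--         inc[k] = -v
--     for k, v in stat_dict2.items():
--         inc[k] = inc.get(k, 0) + v
--     return {k: v for k, v in inc.items() if v != 0}
-- ===== Notes on version B (the rewrite author's own statement) =====
-- stated objective: idiomatic
-- what changed: Replaces A's explicit union-of-keys set with per-key membership guards by a two-pass subtract: seed a dict with the negated values of stat_dict, fold stat_dict2 in with get(k,0)+v, then drop zero entries; no key-set union and no 'in' tests remain.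
import Mathlib
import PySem

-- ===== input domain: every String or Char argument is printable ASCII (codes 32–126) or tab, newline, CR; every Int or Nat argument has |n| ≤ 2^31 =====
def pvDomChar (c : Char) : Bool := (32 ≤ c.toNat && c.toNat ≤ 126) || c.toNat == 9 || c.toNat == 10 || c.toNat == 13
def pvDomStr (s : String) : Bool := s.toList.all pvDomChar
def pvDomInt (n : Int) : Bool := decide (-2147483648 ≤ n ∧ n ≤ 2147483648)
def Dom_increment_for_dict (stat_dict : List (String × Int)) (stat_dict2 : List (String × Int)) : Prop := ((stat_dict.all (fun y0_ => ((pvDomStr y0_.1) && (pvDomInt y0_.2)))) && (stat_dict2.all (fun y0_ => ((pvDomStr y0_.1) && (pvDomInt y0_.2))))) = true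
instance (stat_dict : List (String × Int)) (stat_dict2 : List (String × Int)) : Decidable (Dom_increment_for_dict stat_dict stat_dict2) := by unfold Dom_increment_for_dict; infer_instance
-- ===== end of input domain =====

-- B replaces A's union-of-keys set with membership guards by a two-pass subtract
-- (seed negated dict1, add dict2, drop zeros) — objective: idiomatic/simpler; same cost.
-- Python's iteration order over the key SET is hash-arbitrary; the ports fix the
-- first-occurrence order (dict outputs are compared as dicts, ignoring order).

-- ===== PORT A =====
def increment_for_dict (stat_dict : List (String × Int)) (stat_dict2 : List (String × Int)) : List (String × Int) :=
  let d1 : PySem.Dict String Int := PySem.Dict.ofList stat_dict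
  let d2 : PySem.Dict String Int := PySem.Dict.ofList stat_dict2
  -- keys = stat_dict.keys() | stat_dict2.keys()  (set order is unspecified in Python; first-occurrence order here)
  let keys : PySem.Set String := PySem.Set.union (PySem.Set.ofList d1.keys) d2.keys
  let increment_dict : PySem.Dict String Int :=
    keys.foldl (fun acc x =>
      let count : Int := if d1.contains x then d1.getD x 0 else 0
      let count2 : Int := if d2.contains x then d2.getD x 0 else 0
      let increment := count2 - count
      if increment ≠ 0 then acc.insert x increment else acc) PySem.Dict.empty
  increment_dict.items

-- ===== PORT B =====
def increment_for_dict_alt (stat_dict : List (String × Int)) (stat_dict2 : List (String × Int)) : List (String × Int) :=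
  let d1 : PySem.Dict String Int := PySem.Dict.ofList stat_dict
  let d2 : PySem.Dict String Int := PySem.Dict.ofList stat_dict2
  let inc0 : PySem.Dict String Int :=
    d1.items.foldl (fun inc p => inc.insert p.1 (-p.2)) PySem.Dict.empty
  let inc : PySem.Dict String Int :=
    d2.items.foldl (fun inc p => inc.insert p.1 (inc.getD p.1 0 + p.2)) inc0
  inc.items.filter (fun p => decide (p.2 ≠ 0))

-- ===== PRECONDITION & SPEC =====
def Spec_increment_for_dict (stat_dict : List (String × Int)) (stat_dict2 : List (String × Int)) (out : List (String × Int)) : Prop := out = increment_for_dict_alt stat_dict stat_dict2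
instance (stat_dict : List (String × Int)) (stat_dict2 : List (String × Int)) (out : List (String × Int)) : Decidable (Spec_increment_for_dict stat_dict stat_dict2 out) := by unfold Spec_increment_for_dict; infer_instance

-- ===== CLAIM (what is proved, stated in full; the proofs are below) =====
def Claim_equal_increment_for_dict : Prop := ∀ (stat_dict : List (String × Int)) (stat_dict2 : List (String × Int)), Dom_increment_for_dict stat_dict stat_dict2 → Spec_increment_for_dict stat_dict stat_dict2 (increment_for_dict stat_dict stat_dict2)

-- ===== LEMMAS AND PROOFS =====

-- getD after an insert loop whose written value is g(current value, item value): untouched key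
theorem getD_foldl_insert_notmem (g : Int → Int → Int) (l : List (String × Int))
    (d : PySem.Dict String Int) (k : String) (hk : k ∉ l.map Prod.fst) :
    (l.foldl (fun acc p => acc.insert p.1 (g (acc.getD p.1 0) p.2)) d).getD k 0 = d.getD k 0 := by
  induction l generalizing d with
  | nil => rfl
  | cons p t ih =>
    simp only [List.map_cons, List.mem_cons, not_or] at hk
    simp only [List.foldl_cons]
    rw [ih _ hk.2, PySem.Dict.getD_insert]
    simp [hk.1]

-- getD after such a loop, key hit exactly once
theorem getD_foldl_insert_mem (g : Int → Int → Int) (l : List (String × Int))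
    (d : PySem.Dict String Int) (k : String) (v : Int)
    (hnd : (l.map Prod.fst).Nodup) (hm : (k, v) ∈ l) :
    (l.foldl (fun acc p => acc.insert p.1 (g (acc.getD p.1 0) p.2)) d).getD k 0 =
      g (d.getD k 0) v := by
  induction l generalizing d with
  | nil => cases hm
  | cons p t ih =>
    simp only [List.map_cons, List.nodup_cons] at hnd
    simp only [List.foldl_cons]
    rcases List.mem_cons.mp hm with h | h
    · subst h
      rw [getD_foldl_insert_notmem _ _ _ _ hnd.1, PySem.Dict.getD_insert]
      simp
    · have hne : k ≠ p.1 := by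
        intro he; exact hnd.1 (he ▸ List.mem_map_of_mem (f := Prod.fst) h)
      rw [ih _ hnd.2 h, PySem.Dict.getD_insert]
      simp [hne]

-- the loop over a Dict's items, summarised per key
theorem getD_foldl_items (g : Int → Int → Int) (D : PySem.Dict String Int)
    (d : PySem.Dict String Int) (k : String) (hndD : D.keys.Nodup) :
    (D.items.foldl (fun acc p => acc.insert p.1 (g (acc.getD p.1 0) p.2)) d).getD k 0 =
      if D.contains k then g (d.getD k 0) (D.getD k 0) else d.getD k 0 := by
  have hnd : (D.items.map Prod.fst).Nodup := hndD
  by_cases hc : D.contains k = true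
  · obtain ⟨v, hv⟩ : ∃ v, D.get? k = some v := by
      cases h : D.get? k with
      | none => rw [PySem.Dict.contains_eq_isSome_get?, h] at hc; cases hc
      | some v => exact ⟨v, rfl⟩
    have hm : (k, v) ∈ D.items :=
      (PySem.Dict.get?_eq_some_iff_mem_items D k v hnd).mp hv
    rw [getD_foldl_insert_mem g _ _ _ _ hnd hm, if_pos hc,
      PySem.Dict.getD_of_get?_eq_some D 0 hv]
  · have hc' : D.contains k = false := by simpa using hc
    have hk : k ∉ D.items.map Prod.fst := by
      intro hmem
      exact hc ((PySem.Dict.contains_iff_mem_keys D k).mpr hmem)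
    rw [getD_foldl_insert_notmem g _ _ _ hk, if_neg hc]

-- per-key value of B's final dict = count2 - count
theorem alt_getD (d1 d2 : PySem.Dict String Int) (k : String)
    (hnd1 : d1.keys.Nodup) (hnd2 : d2.keys.Nodup) :
    ((d2.items.foldl (fun inc p => inc.insert p.1 (inc.getD p.1 0 + p.2))
        (d1.items.foldl (fun inc p => inc.insert p.1 (-p.2)) PySem.Dict.empty)).getD k 0) =
      (if d2.contains k then d2.getD k 0 else 0) - (if d1.contains k then d1.getD k 0 else 0) := by
  have h1 : (d1.items.foldl (fun inc p => inc.insert p.1 (-p.2)) PySem.Dict.empty).getD k 0 =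
      if d1.contains k then -(d1.getD k 0) else 0 := by
    have := getD_foldl_items (fun _ v => -v) d1 PySem.Dict.empty k hnd1
    simpa using this
  have h2 := getD_foldl_items (fun cur v => cur + v) d2
      (d1.items.foldl (fun inc p => inc.insert p.1 (-p.2)) PySem.Dict.empty) k hnd2
  rw [h2, h1]
  by_cases hc2 : d2.contains k <;> by_cases hc1 : d1.contains k <;> simp [hc1, hc2] <;> try ring

-- ===== VERDICT (by name: the statement is the Claim_ definition above) =====
theorem increment_for_dict_spec : Claim_equal_increment_for_dict := by
  intro stat_dict stat_dict2 _
  show increment_for_dict stat_dict stat_dict2 = increment_for_dict_alt stat_dict stat_dict2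
  unfold increment_for_dict increment_for_dict_alt
  set d1 : PySem.Dict String Int := PySem.Dict.ofList stat_dict with hd1
  set d2 : PySem.Dict String Int := PySem.Dict.ofList stat_dict2 with hd2
  -- the per-key difference, as A computes it
  set f : String → Int := fun x =>
    (if d2.contains x then d2.getD x 0 else 0) - (if d1.contains x then d1.getD x 0 else 0) with hf
  set keys : PySem.Set String := PySem.Set.union (PySem.Set.ofList d1.keys) d2.keys with hkeys
  have hndk : keys.Nodup :=
    PySem.Set.nodup_union _ _ (PySem.Set.nodup_ofList d1.keys)
  -- A's side: the guarded insert loop is an append of the nonzero keys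
  have hA : (keys.foldl (fun acc x =>
      let count : Int := if d1.contains x then d1.getD x 0 else 0
      let count2 : Int := if d2.contains x then d2.getD x 0 else 0
      let increment := count2 - count
      if increment ≠ 0 then acc.insert x increment else acc) PySem.Dict.empty).items =
      (keys.filter (fun x => decide (f x ≠ 0))).map (fun x => (x, f x)) := by
    have hstep : (fun (acc : PySem.Dict String Int) x =>
        let count : Int := if d1.contains x then d1.getD x 0 else 0
        let count2 : Int := if d2.contains x then d2.getD x 0 else 0
        let increment := count2 - count
        if increment ≠ 0 then acc.insert x increment else acc) =
        (fun acc x => if f x ≠ 0 then acc.insert x (f x) else acc) := rfl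
    rw [hstep, PySem.List.foldl_ite_eq_foldl_filter (fun x => f x ≠ 0)
      (fun acc x => acc.insert x (f x)) keys PySem.Dict.empty]
    rw [PySem.Dict.items_foldl_insert_fresh _ (fun x => x) f PySem.Dict.empty
      (fun a _ => PySem.Dict.contains_empty a)
      (by simpa using List.Nodup.filter _ hndk)]
    simp [PySem.Dict.empty]
  -- B's side: items of the final dict, as key list + per-key values
  set inc0 : PySem.Dict String Int :=
    d1.items.foldl (fun inc p => inc.insert p.1 (-p.2)) PySem.Dict.empty with hinc0
  set inc : PySem.Dict String Int :=
    d2.items.foldl (fun inc p => inc.insert p.1 (inc.getD p.1 0 + p.2)) inc0 with hinc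
  have hkeysB : inc.keys = keys := by
    rw [hinc, PySem.Dict.keys_foldl_insert_key d2.items (fun p => p.1)
      (fun d p => d.getD p.1 0 + p.2) inc0]
    rw [hinc0, PySem.Dict.keys_foldl_insert_key d1.items (fun p => p.1)
      (fun _ p => -p.2) PySem.Dict.empty]
    rfl
  have hndB : inc.keys.Nodup := by
    rw [hinc]
    exact PySem.Dict.nodup_keys_foldl_insert_key _ _ _ _
      (by rw [hinc0]; exact PySem.Dict.nodup_keys_foldl_insert_key _ _ _ _ (by simp))
  have hvalB : ∀ k, inc.getD k 0 = f k := by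
    intro k
    rw [hinc, hinc0]
    have := alt_getD d1 d2 k (PySem.Dict.nodup_keys_ofList stat_dict) (PySem.Dict.nodup_keys_ofList stat_dict2)
    simpa [hf] using this
  have hB : inc.items = keys.map (fun k => (k, f k)) := by
    rw [PySem.Dict.items_eq_map_keys inc hndB 0, hkeysB]
    exact List.map_congr_left (fun k _ => by rw [hvalB k])
  show (keys.foldl (fun acc x =>
      let count : Int := if d1.contains x then d1.getD x 0 else 0
      let count2 : Int := if d2.contains x then d2.getD x 0 else 0
      let increment := count2 - count
      if increment ≠ 0 then acc.insert x increment else acc) PySem.Dict.empty).items =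
    inc.items.filter (fun p => decide (p.2 ≠ 0))
  rw [hA, hB, List.filter_map]
  rfl
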